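-- pv_equiv track=rewrite | github.com/KingICCrab/pim_mapper | validation/dram/analyze_decomposed.py | compute_w_direction_switches
-- ===== SOURCE A (Python) =====
-- def compute_w_direction_switches(Q_l3, S_l2, W_step, S_step, W_tile, block_w):
--     """计算 W 方向的 switches."""
--     prev_w_block = -1
--     switches = 0
--
--     for q in range(Q_l3):
--         for s in range(S_l2):
--             w_start = q * W_step + s * S_step
--             w_block = w_start // block_w
--
--             w_end = w_start + W_tile - 1
--             w_block_end = w_end // block_w
--
--             for wb in range(w_block, w_block_end + 1):
--                 if wb != prev_w_block:
--                     switches += 1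
--                     prev_w_block = wb
--
--     return switches
-- ===== SOURCE B (Python) =====
-- def compute_w_direction_switches(Q_l3, S_l2, W_step, S_step, W_tile, block_w):
--     """Two staged passes over the stream of per-tile block intervals:
--     first sum all per-tile block counts, then subtract the boundary
--     coincidences (tiles whose first block equals the previous tile's last)."""
--     def intervals():
--         for q in range(Q_l3):
--             for s in range(S_l2):
--                 w = q * W_step + s * S_step
--                 b, e = w // block_w, (w + W_tile - 1) // block_w
--                 if b <= e:
--                     yield b, e
--     total = sum(e - b + 1 for b, e in intervals())
--     overlap = 0
--     prev = -1
--     for b, e in intervals():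
--         if b == prev:
--             overlap += 1
--         prev = e
--     return total - overlap
-- ===== Notes on version B (the rewrite author's own statement) =====
-- stated objective: alternative
-- what changed: Replaces A's single stateful triple loop (inner loop visiting every block of every tile) by two staged passes over the stream of per-tile block intervals: one pass sums the block counts, a second pass counts and subtracts first-block/previous-last-block coincidences; no per-block iteration remains.
import Mathlib
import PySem

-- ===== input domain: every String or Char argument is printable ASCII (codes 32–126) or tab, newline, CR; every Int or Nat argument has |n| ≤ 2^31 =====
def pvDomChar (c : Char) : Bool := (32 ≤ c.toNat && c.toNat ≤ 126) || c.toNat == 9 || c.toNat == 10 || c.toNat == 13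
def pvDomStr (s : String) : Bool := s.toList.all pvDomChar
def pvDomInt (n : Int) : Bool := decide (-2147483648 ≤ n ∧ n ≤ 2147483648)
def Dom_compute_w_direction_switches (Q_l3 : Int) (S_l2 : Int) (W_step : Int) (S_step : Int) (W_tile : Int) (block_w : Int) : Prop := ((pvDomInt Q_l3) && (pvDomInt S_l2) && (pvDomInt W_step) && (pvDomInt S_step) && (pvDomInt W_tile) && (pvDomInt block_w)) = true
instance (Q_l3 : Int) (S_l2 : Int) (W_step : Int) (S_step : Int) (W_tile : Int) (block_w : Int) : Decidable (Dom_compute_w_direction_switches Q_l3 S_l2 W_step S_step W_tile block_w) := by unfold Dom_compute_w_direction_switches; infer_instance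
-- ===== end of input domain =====

-- B replaces A's stateful triple loop by two staged passes over the per-tile block
-- intervals: one summing block counts, one counting boundary coincidences
-- (objective: alternative).
-- ===== PORT A =====
def compute_w_direction_switches (Q_l3 : Int) (S_l2 : Int) (W_step : Int) (S_step : Int) (W_tile : Int) (block_w : Int) : Int :=
  let st : Int × Int :=
    (PySem.List.pyRange 0 Q_l3 1).foldl (fun st q =>
      (PySem.List.pyRange 0 S_l2 1).foldl (fun st s =>
        let w_start := q * W_step + s * S_step
        let w_block := PySem.Int.floordiv w_start block_w
        let w_end := w_start + W_tile - 1
        let w_block_end := PySem.Int.floordiv w_end block_w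
        (PySem.List.pyRange w_block (w_block_end + 1) 1).foldl (fun st wb =>
          if wb ≠ st.1 then (wb, st.2 + 1) else st) st) st) ((-1 : Int), (0 : Int))
  st.2

-- ===== PORT B =====
def compute_w_direction_switches_alt (Q_l3 : Int) (S_l2 : Int) (W_step : Int) (S_step : Int) (W_tile : Int) (block_w : Int) : Int :=
  let intervals : List (Int × Int) :=
    ((PySem.List.pyRange 0 Q_l3 1).flatMap (fun q =>
      (PySem.List.pyRange 0 S_l2 1).map (fun s =>
        (PySem.Int.floordiv (q * W_step + s * S_step) block_w,
         PySem.Int.floordiv (q * W_step + s * S_step + W_tile - 1) block_w)))).filter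
      (fun p => decide (p.1 ≤ p.2))
  let total := (intervals.map (fun p => p.2 - p.1 + 1)).foldl (· + ·) 0
  let st := intervals.foldl
      (fun st p => ((p.2 : Int), st.2 + (if p.1 = st.1 then (1 : Int) else 0))) ((-1 : Int), (0 : Int))
  total - st.2

-- ===== PRECONDITION & SPEC =====
-- A raises ZeroDivisionError exactly when block_w = 0 and both loops run; everywhere else it returns.
def Pre_compute_w_direction_switches (Q_l3 : Int) (S_l2 : Int) (W_step : Int) (S_step : Int) (W_tile : Int) (block_w : Int) : Prop :=
  block_w ≠ 0 ∨ Q_l3 ≤ 0 ∨ S_l2 ≤ 0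
instance (Q_l3 : Int) (S_l2 : Int) (W_step : Int) (S_step : Int) (W_tile : Int) (block_w : Int) : Decidable (Pre_compute_w_direction_switches Q_l3 S_l2 W_step S_step W_tile block_w) := by unfold Pre_compute_w_direction_switches; infer_instance
def pvWitness_compute_w_direction_switches : Int × Int × Int × Int × Int × Int := (3, 2, 4, 1, 5, 3)

def Spec_compute_w_direction_switches (Q_l3 : Int) (S_l2 : Int) (W_step : Int) (S_step : Int) (W_tile : Int) (block_w : Int) (out : Int) : Prop := out = compute_w_direction_switches_alt Q_l3 S_l2 W_step S_step W_tile block_w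
instance (Q_l3 : Int) (S_l2 : Int) (W_step : Int) (S_step : Int) (W_tile : Int) (block_w : Int) (out : Int) : Decidable (Spec_compute_w_direction_switches Q_l3 S_l2 W_step S_step W_tile block_w out) := by unfold Spec_compute_w_direction_switches; infer_instance

-- ===== CLAIM =====
def Claim_equal_compute_w_direction_switches : Prop := ∀ (Q_l3 : Int) (S_l2 : Int) (W_step : Int) (S_step : Int) (W_tile : Int) (block_w : Int), Dom_compute_w_direction_switches Q_l3 S_l2 W_step S_step W_tile block_w → Pre_compute_w_direction_switches Q_l3 S_l2 W_step S_step W_tile block_w → Spec_compute_w_direction_switches Q_l3 S_l2 W_step S_step W_tile block_w (compute_w_direction_switches Q_l3 S_l2 W_step S_step W_tile block_w)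

-- ===== LEMMAS AND PROOFS =====
-- A's innermost loop over a tile's consecutive block range collapses to a closed form.
theorem innerA_closed_aux (e : Int) : ∀ (n : ℕ) (b prev sw : Int), (e + 1 - b).toNat = n →
    (PySem.List.pyRange b (e + 1) 1).foldl (fun st wb =>
        if wb ≠ st.1 then (wb, st.2 + 1) else st) (prev, sw) =
      if b ≤ e then (e, sw + (e - b + 1) - (if b = prev then 1 else 0)) else (prev, sw) := by
  intro n
  induction n with
  | zero =>
    intro b prev sw h
    rw [PySem.List.pyRange_one_eq_nil (by omega), if_neg (by omega)]
    rfl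
  | succ m ih =>
    intro b prev sw h
    rw [PySem.List.pyRange_one_cons (by omega), List.foldl_cons]
    by_cases hp : b = prev
    · rw [if_neg (by simp [hp]), ih (b + 1) prev sw (by omega)]
      split_ifs <;> exact Prod.ext (by omega) (by omega)
    · rw [if_pos hp, ih (b + 1) b (sw + 1) (by omega)]
      split_ifs <;> exact Prod.ext (by omega) (by omega)

theorem innerA_closed (prev sw b e : Int) :
    (PySem.List.pyRange b (e + 1) 1).foldl (fun st wb =>
        if wb ≠ st.1 then (wb, st.2 + 1) else st) (prev, sw) =
      if b ≤ e then (e, sw + (e - b + 1) - (if b = prev then 1 else 0)) else (prev, sw) :=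
  innerA_closed_aux e _ b prev sw rfl

theorem foldl_add_shift (l : List Int) : ∀ (a : Int), l.foldl (· + ·) a = a + l.foldl (· + ·) 0 := by
  induction l with
  | nil => intro a; simp
  | cons x xs ih => intro a; simp only [List.foldl_cons]; rw [ih (a + x), ih (0 + x)]; ring

-- shifting the overlap-counter accumulator out of the second-pass fold
theorem overlap_shift (ts : List (Int × Int)) : ∀ (prev c : Int),
    (ts.foldl (fun st p => ((p.2 : Int), st.2 + (if p.1 = st.1 then (1 : Int) else 0))) (prev, c)).2 =
      c + (ts.foldl (fun st p => ((p.2 : Int), st.2 + (if p.1 = st.1 then (1 : Int) else 0))) (prev, 0)).2 := by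
  induction ts with
  | nil => intro prev c; simp
  | cons t rest ih =>
    intro prev c
    simp only [List.foldl_cons]
    rw [ih t.2, ih t.2 (0 + _)]
    ring

-- the collapsed sequential fold splits into B's two passes: total blocks minus overlaps
theorem fold_closed (ts : List (Int × Int)) : ∀ (prev sw : Int),
    (ts.foldl (fun st p => ((p.2 : Int), st.2 + (p.2 - p.1 + 1) - (if p.1 = st.1 then 1 else 0))) (prev, sw)).2 =
      sw + (ts.map (fun p => p.2 - p.1 + 1)).foldl (· + ·) 0
        - (ts.foldl (fun st p => ((p.2 : Int), st.2 + (if p.1 = st.1 then (1 : Int) else 0))) (prev, 0)).2 := by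
  induction ts with
  | nil => intro prev sw; simp
  | cons t rest ih =>
    intro prev sw
    simp only [List.foldl_cons, List.map_cons]
    rw [ih t.2, foldl_add_shift _ (0 + (t.2 - t.1 + 1))]
    rw [overlap_shift rest t.2 (0 + (if t.1 = prev then 1 else 0))]
    split_ifs <;> ring

theorem compute_w_direction_switches_spec : Claim_equal_compute_w_direction_switches := by
  intro Q_l3 S_l2 W_step S_step W_tile block_w _ _
  simp only [Spec_compute_w_direction_switches, compute_w_direction_switches,
    compute_w_direction_switches_alt]
  have hcollapse :
      ∀ (l : List (Int × Int)) (st : Int × Int),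
        l.foldl (fun st p => if p.1 ≤ p.2 then ((p.2 : Int), st.2 + (p.2 - p.1 + 1) - (if p.1 = st.1 then 1 else 0)) else st) st
          = (l.filter (fun p => decide (p.1 ≤ p.2))).foldl
              (fun st p => ((p.2 : Int), st.2 + (p.2 - p.1 + 1) - (if p.1 = st.1 then 1 else 0))) st := by
    intro l st
    rw [List.foldl_filter]
    apply PySem.List.foldl_congr_mem
    intro st p _
    by_cases h : p.1 ≤ p.2
    · rw [if_pos h, if_pos (show (decide (p.1 ≤ p.2)) = true by simp [h])]
    · rw [if_neg h, if_neg (show ¬ (decide (p.1 ≤ p.2)) = true by simp [h])]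
  have hA :
      ((PySem.List.pyRange 0 Q_l3 1).foldl (fun st q =>
        (PySem.List.pyRange 0 S_l2 1).foldl (fun st s =>
          (PySem.List.pyRange (PySem.Int.floordiv (q * W_step + s * S_step) block_w)
              (PySem.Int.floordiv (q * W_step + s * S_step + W_tile - 1) block_w + 1) 1).foldl
            (fun st wb => if wb ≠ st.1 then (wb, st.2 + 1) else st) st) st) ((-1 : Int), (0 : Int)))
      = ((PySem.List.pyRange 0 Q_l3 1).flatMap (fun q =>
          (PySem.List.pyRange 0 S_l2 1).map (fun s =>
            (PySem.Int.floordiv (q * W_step + s * S_step) block_w,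
             PySem.Int.floordiv (q * W_step + s * S_step + W_tile - 1) block_w)))).foldl
          (fun st p => if p.1 ≤ p.2 then ((p.2 : Int), st.2 + (p.2 - p.1 + 1) - (if p.1 = st.1 then 1 else 0)) else st)
          ((-1 : Int), (0 : Int)) := by
    rw [List.foldl_flatMap]
    apply PySem.List.foldl_congr_mem
    intro st q _
    rw [List.foldl_map]
    apply PySem.List.foldl_congr_mem
    intro st s _
    obtain ⟨p, c⟩ := st
    rw [innerA_closed p c]
  rw [hA, hcollapse, fold_closed]
  ring
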